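-- pv_equiv track=rewrite | github.com/chioujryu/InsightForge | agent.py | _should_use_knowledge_base
-- ===== SOURCE A (Python) =====
-- def _should_use_knowledge_base(query: str) -> bool:
--     """
--     判斷是否應該使用知識庫
--
--     Args:
--         query: 用戶查詢
--
--     Returns:
--         bool: 是否使用知識庫
--     """
--     company_keywords = [
--         '公司', '政策', '程序', '指南', '編碼風格', 'coding style',
--         'policy', 'procedure', 'guideline', 'zuru', 'melon',
--         '內部', '員工', '規定', '規範', '標準'
--     ]
--
--     query_lower = query.lower()
--     return any(keyword in query_lower for keyword in company_keywords)
-- ===== SOURCE B (Python) =====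
-- def _should_use_knowledge_base(query: str) -> bool:
--     """Position-driven scan: at each index of the lowered query, check whether
--     any company keyword starts there (instead of one substring search per keyword)."""
--     company_keywords = [
--         '公司', '政策', '程序', '指南', '編碼風格', 'coding style',
--         'policy', 'procedure', 'guideline', 'zuru', 'melon',
--         '內部', '員工', '規定', '規範', '標準'
--     ]
--     q = query.lower()
--     return any(
--         q.startswith(keyword, i)
--         for i in range(len(q) + 1)
--         for keyword in company_keywords
--     )
-- ===== Notes on version B (the rewrite author's own statement) =====
-- stated objective: alternative
-- what changed: B scans the lowered query position by position and tests whether any keyword starts at that position, instead of A's one independent substring search per keyword.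
import Mathlib
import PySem

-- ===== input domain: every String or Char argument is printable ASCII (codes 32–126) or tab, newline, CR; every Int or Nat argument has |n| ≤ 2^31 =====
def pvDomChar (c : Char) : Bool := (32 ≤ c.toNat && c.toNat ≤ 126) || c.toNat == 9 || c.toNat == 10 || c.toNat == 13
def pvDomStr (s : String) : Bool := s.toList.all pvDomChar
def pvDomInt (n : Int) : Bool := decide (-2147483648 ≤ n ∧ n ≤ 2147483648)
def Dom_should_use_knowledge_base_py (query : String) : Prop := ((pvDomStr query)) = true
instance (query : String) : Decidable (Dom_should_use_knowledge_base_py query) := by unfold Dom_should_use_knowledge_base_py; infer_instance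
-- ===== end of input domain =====

-- B replaces A's per-keyword substring searches by a single position-by-position scan
-- of the lowered query, testing at each index whether any keyword starts there (alternative, same cost).

def pvCompanyKeywords : List String :=
  ["公司", "政策", "程序", "指南", "編碼風格", "coding style",
   "policy", "procedure", "guideline", "zuru", "melon",
   "內部", "員工", "規定", "規範", "標準"]

-- ===== PORT A =====
def should_use_knowledge_base_py (query : String) : Bool :=
  let query_lower := PySem.Str.lower query
  pvCompanyKeywords.any (fun keyword => PySem.Str.isIn keyword query_lower)

-- ===== PORT B =====
-- q.startswith(keyword, i) for 0 ≤ i is exactly a prefix test on q[i:] (exact here: i ranges over 0..len(q))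
def should_use_knowledge_base_py_alt (query : String) : Bool :=
  let q := PySem.Str.lower query
  (List.range (q.toList.length + 1)).any (fun i =>
    pvCompanyKeywords.any (fun keyword =>
      PySem.Chars.startswith (q.toList.drop i) keyword.toList))

-- ===== PRECONDITION & SPEC =====
def Spec_should_use_knowledge_base_py (query : String) (out : Bool) : Prop := out = should_use_knowledge_base_py_alt query
instance (query : String) (out : Bool) : Decidable (Spec_should_use_knowledge_base_py query out) := by unfold Spec_should_use_knowledge_base_py; infer_instance

-- ===== CLAIM (what is proved, stated in full; the proofs are below) =====
def Claim_equal_should_use_knowledge_base_py : Prop := ∀ (query : String), Dom_should_use_knowledge_base_py query → Spec_should_use_knowledge_base_py query (should_use_knowledge_base_py query)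

-- ===== LEMMAS AND PROOFS =====

theorem pv_isIn_eq_scan (sub s : List Char) :
    PySem.Chars.isIn sub s =
      (List.range (s.length + 1)).any (fun i => PySem.Chars.startswith (s.drop i) sub) := by
  rcases h : (List.range (s.length + 1)).any (fun i => PySem.Chars.startswith (s.drop i) sub) with _ | _
  · rw [PySem.Chars.isIn_eq_false_iff]
    simp only [List.any_eq_false, List.mem_range] at h
    intro hinf
    obtain ⟨j, hj⟩ := (PySem.Chars.exists_prefix_drop_iff_isIn sub s).2
      ((PySem.Chars.isIn_iff_infix sub s).2 hinf)
    by_cases hjle : j ≤ s.length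
    · exact absurd ((PySem.Chars.startswith_iff _ _).2 hj) (by simpa using h j (by omega))
    · have : s.drop j = [] := List.drop_eq_nil_of_le (by omega)
      rw [this] at hj
      have hsub : sub = [] := List.prefix_nil.mp hj
      have := h s.length (by omega)
      simp [hsub, PySem.Chars.startswith_iff] at this
  · simp only [List.any_eq_true, List.mem_range] at h
    obtain ⟨i, _, hi⟩ := h
    exact (PySem.Chars.exists_prefix_drop_iff_isIn sub s).1
      ⟨i, (PySem.Chars.startswith_iff _ _).1 hi⟩

theorem pv_any_comm {α β : Type} (l1 : List α) (l2 : List β) (p : α → β → Bool) :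
    l1.any (fun a => l2.any (fun b => p a b)) = l2.any (fun b => l1.any (fun a => p a b)) := by
  rcases h : l2.any (fun b => l1.any (fun a => p a b)) with _ | _ <;>
    simp only [List.any_eq_false, List.any_eq_true] at h ⊢
  · intro a ha
    simp only [not_exists, not_and] at h ⊢
    intro b hb; exact h b hb a ha
  · obtain ⟨b, hb, a, ha, hp⟩ := h; exact ⟨a, ha, b, hb, hp⟩

-- ===== VERDICT (by name: the statement is the Claim_ definition above) =====
theorem should_use_knowledge_base_py_spec : Claim_equal_should_use_knowledge_base_py := by
  intro query _
  unfold Spec_should_use_knowledge_base_py should_use_knowledge_base_py should_use_knowledge_base_py_alt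
  simp only [PySem.Str.isIn_eq]
  rw [pv_any_comm]
  congr 1
  funext keyword
  exact pv_isIn_eq_scan keyword.toList (PySem.Str.lower query).toList
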